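-- pv_equiv track=rewrite | github.com/thetrashyNoob27/peters_dumb_ass_script_collection | cat_EOF_create_script/cat_EOF_dir.py | reduce_paths
-- ===== SOURCE A (Python) =====
-- def reduce_paths(paths):
--     parent_dirs = set()
--     for path in paths:
--         parts = path.split('/')
--         for i in range(1, len(parts)):
--             parent_dirs.add('/'.join(parts[:i]))
--     reduced_paths = [path for path in paths if path not in parent_dirs]
--
--     return reduced_paths
-- ===== SOURCE B (Python) =====
-- def reduce_paths(paths):
--     split = [p.split('/') for p in paths]
--     return [p for p, ps in zip(paths, split)
--             if not any(len(qs) > len(ps) and qs[:len(ps)] == ps for qs in split)]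
-- ===== Notes on version B (the rewrite author's own statement) =====
-- stated objective: alternative
-- what changed: Replaces A's precomputed set of all joined parent-prefix strings with one pass that keeps a path iff no path's split part-list strictly extends this path's part-list (direct pairwise prefix comparison, no set and no join).
import Mathlib
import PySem

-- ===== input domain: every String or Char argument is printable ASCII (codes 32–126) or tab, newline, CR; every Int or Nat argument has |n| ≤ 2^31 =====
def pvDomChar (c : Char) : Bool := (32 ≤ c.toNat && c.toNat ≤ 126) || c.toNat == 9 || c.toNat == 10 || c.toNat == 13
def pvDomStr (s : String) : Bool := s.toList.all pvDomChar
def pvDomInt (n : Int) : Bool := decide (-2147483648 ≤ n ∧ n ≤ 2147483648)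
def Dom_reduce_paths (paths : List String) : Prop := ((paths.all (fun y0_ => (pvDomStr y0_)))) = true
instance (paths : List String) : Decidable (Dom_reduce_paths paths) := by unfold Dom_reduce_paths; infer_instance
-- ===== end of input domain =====

-- B replaces A's set of all joined parent prefixes by a direct pairwise comparison of split
-- part-lists (alternative decomposition, similar cost; no speed claim).

-- ===== PORT A =====
-- Python strings are handled as List Char (PySem.Chars); the set of parent dirs is a PySem.Set.
def reduce_paths (paths : List String) : List String :=
  let parent_dirs : PySem.Set (List Char) :=
    paths.foldl (fun s path =>
      let parts := PySem.Chars.splitOn path.toList ['/']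
      (PySem.List.pyRange 1 (parts.length : Int)).foldl
        (fun s i => PySem.Set.add s (PySem.Chars.join ['/'] (parts.take i.toNat))) s)
      PySem.Set.empty
  paths.filter (fun path => !(PySem.Set.contains parent_dirs path.toList))

-- ===== PORT B =====
def reduce_paths_alt (paths : List String) : List String :=
  let split := paths.map (fun p => PySem.Chars.splitOn p.toList ['/'])
  ((paths.zip split).filter (fun pq =>
      !(split.any (fun qs =>
          decide (pq.2.length < qs.length) && qs.take pq.2.length == pq.2)))).map (·.1)

-- ===== PRECONDITION & SPEC =====
def Spec_reduce_paths (paths : List String) (out : List String) : Prop := out = reduce_paths_alt paths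
instance (paths : List String) (out : List String) : Decidable (Spec_reduce_paths paths out) := by unfold Spec_reduce_paths; infer_instance

-- ===== CLAIM (what is proved, stated in full; the proofs are below) =====
def Claim_equal_reduce_paths : Prop := ∀ (paths : List String), Dom_reduce_paths paths → Spec_reduce_paths paths (reduce_paths paths)

-- ===== LEMMAS AND PROOFS =====

def spC (c : Char) : List Char → List (List Char)
  | [] => [[]]
  | d :: rest => if d = c then [] :: spC c rest else (spC c rest).modifyHead (d :: ·)

theorem spC_ne_nil (c : Char) (s : List Char) : spC c s ≠ [] := by
  induction s with
  | nil => simp [spC]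
  | cons d rest ih =>
    simp only [spC]
    split
    · simp
    · cases h : spC c rest with
      | nil => exact absurd h ih
      | cons a t => simp [List.modifyHead]

theorem splitOn_go_eq (c : Char) (fuel : Nat) (s cur : List Char) (acc : List (List Char))
    (h : s.length ≤ fuel) :
    PySem.Chars.splitOn.go [c] fuel s cur acc
      = acc.reverse ++ (spC c s).modifyHead (cur.reverse ++ ·) := by
  induction fuel generalizing s cur acc with
  | zero =>
    have : s = [] := by cases s <;> simp_all
    subst this
    rw [PySem.Chars.splitOn.go.eq_def]
    simp [spC]
  | succ fuel ih =>
    rw [PySem.Chars.splitOn.go.eq_def]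
    cases s with
    | nil => simp [spC]
    | cons d rest =>
      by_cases hd : d = c
      · subst hd
        have hpre : [d].isPrefixOf (d :: rest) = true := by simp [List.isPrefixOf]
        simp only [hpre, if_true, List.length_cons, List.length_nil, List.drop_succ_cons, List.drop_zero]
        rw [ih rest [] (cur.reverse :: acc) (by simpa using Nat.lt_succ_iff.mp (by simpa using h))]
        simp [spC, List.modifyHead]
        cases hsp : spC d rest with
        | nil => exact absurd hsp (spC_ne_nil d rest)
        | cons a t => simp
      · have hpre : [c].isPrefixOf (d :: rest) = false := by
          simp [List.isPrefixOf]
          intro hdc; exact hd hdc.symm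
        simp only [hpre, Bool.false_eq_true, if_false]
        rw [ih rest (d :: cur) acc (by simpa using Nat.lt_succ_iff.mp (by simpa using h))]
        simp only [spC, if_neg hd]
        cases hsp : spC c rest with
        | nil => exact absurd hsp (spC_ne_nil c rest)
        | cons a t => simp [List.modifyHead]

theorem splitOn_eq_spC (c : Char) (s : List Char) :
    PySem.Chars.splitOn s [c] = spC c s := by
  rw [PySem.Chars.splitOn]
  rw [splitOn_go_eq c (s.length + 1) s [] [] (by omega)]
  cases hsp : spC c s with
  | nil => exact absurd hsp (spC_ne_nil c s)
  | cons a t => simp [List.modifyHead]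

theorem join_spC (c : Char) (s : List Char) :
    PySem.Chars.join [c] (spC c s) = s := by
  induction s with
  | nil => simp [spC, PySem.Chars.join_singleton]
  | cons d rest ih =>
    simp only [spC]
    by_cases hd : d = c
    · subst hd
      rw [if_pos rfl]
      cases hsp : spC d rest with
      | nil => exact absurd hsp (spC_ne_nil d rest)
      | cons a t =>
        rw [hsp] at ih
        rw [PySem.Chars.join_cons_cons]
        simp [ih]
    · rw [if_neg hd]
      cases hsp : spC c rest with
      | nil => exact absurd hsp (spC_ne_nil c rest)
      | cons a t =>
        rw [hsp] at ih
        cases t with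
        | nil =>
          simp only [List.modifyHead, PySem.Chars.join_singleton] at *
          simp [ih]
        | cons b t' =>
          simp only [List.modifyHead, PySem.Chars.join_cons_cons] at *
          simp [ih]

theorem not_mem_of_mem_spC (c : Char) (s x : List Char) (hx : x ∈ spC c s) : c ∉ x := by
  induction s generalizing x with
  | nil => simp [spC] at hx; simp [hx]
  | cons d rest ih =>
    simp only [spC] at hx
    by_cases hd : d = c
    · rw [if_pos hd] at hx
      rcases List.mem_cons.mp hx with h | h
      · simp [h]
      · exact ih x h
    · rw [if_neg hd] at hx
      cases hsp : spC c rest with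
      | nil => exact absurd hsp (spC_ne_nil c rest)
      | cons a t =>
        rw [hsp] at hx
        simp only [List.modifyHead] at hx
        rcases List.mem_cons.mp hx with h | h
        · subst h
          have ha : c ∉ a := ih a (by rw [hsp]; exact List.mem_cons_self)
          simp [hd, ha, Ne.symm]
        · exact ih x (by rw [hsp]; exact List.mem_cons_of_mem _ h)

theorem spC_of_not_mem (c : Char) (x : List Char) (hx : c ∉ x) : spC c x = [x] := by
  induction x with
  | nil => simp [spC]
  | cons d rest ih =>
    simp only [spC]
    have hd : d ≠ c := by intro h; exact hx (by simp [h])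
    rw [if_neg hd, ih (fun h => hx (List.mem_cons_of_mem _ h))]
    simp [List.modifyHead]

theorem spC_append (c : Char) (x r : List Char) (hx : c ∉ x) :
    spC c (x ++ c :: r) = x :: spC c r := by
  induction x with
  | nil => simp [spC]
  | cons d rest ih =>
    have hd : d ≠ c := by intro h; exact hx (by simp [h])
    simp only [List.cons_append, spC, if_neg hd]
    rw [ih (fun h => hx (List.mem_cons_of_mem _ h))]
    simp [List.modifyHead]

theorem spC_join (c : Char) (xs : List (List Char)) (hne : xs ≠ [])
    (hfree : ∀ x ∈ xs, c ∉ x) : spC c (PySem.Chars.join [c] xs) = xs := by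
  induction xs with
  | nil => exact absurd rfl hne
  | cons x t ih =>
    cases t with
    | nil =>
      rw [PySem.Chars.join_singleton]
      exact spC_of_not_mem c x (hfree x List.mem_cons_self)
    | cons y t' =>
      rw [PySem.Chars.join_cons_cons]
      have : x ++ [c] ++ PySem.Chars.join [c] (y :: t') = x ++ c :: PySem.Chars.join [c] (y :: t') := by simp
      rw [this, spC_append c x _ (hfree x List.mem_cons_self)]
      rw [ih (by simp) (fun z hz => hfree z (List.mem_cons_of_mem _ hz))]

theorem prefix_char (p q : List Char) :
    (∃ i : Int, 1 ≤ i ∧ i < ((spC '/' q).length : Int) ∧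
        p = PySem.Chars.join ['/'] ((spC '/' q).take i.toNat))
      ↔ ((spC '/' p).length < (spC '/' q).length ∧
          (spC '/' q).take (spC '/' p).length = spC '/' p) := by
  constructor
  · rintro ⟨i, h1, h2, hp⟩
    have hk1 : 1 ≤ i.toNat := by omega
    have hk2 : i.toNat < (spC '/' q).length := by omega
    have hlen : ((spC '/' q).take i.toNat).length = i.toNat := by
      simp [List.length_take]; omega
    have hfree : ∀ x ∈ (spC '/' q).take i.toNat, '/' ∉ x := fun x hx =>
      not_mem_of_mem_spC '/' q x (List.mem_of_mem_take hx)
    have hne : (spC '/' q).take i.toNat ≠ [] := by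
      intro h; rw [h] at hlen; simp at hlen; omega
    have hsp : spC '/' p = (spC '/' q).take i.toNat := by
      rw [hp]; exact spC_join '/' _ hne hfree
    rw [hsp, hlen]
    exact ⟨hk2, rfl⟩
  · rintro ⟨hlt, htake⟩
    have hne := spC_ne_nil '/' p
    have hpos : 1 ≤ (spC '/' p).length := List.length_pos_of_ne_nil hne
    refine ⟨((spC '/' p).length : Int), by exact_mod_cast hpos, by exact_mod_cast hlt, ?_⟩
    have : ((spC '/' p).length : Int).toNat = (spC '/' p).length := by simp
    rw [this, htake, join_spC]

theorem mem_foldl_add {α β : Type} [BEq α] [LawfulBEq α] (l : List β) (f : β → α)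
    (s : PySem.Set α) (x : α) :
    x ∈ l.foldl (fun s i => PySem.Set.add s (f i)) s ↔ x ∈ s ∨ ∃ i ∈ l, x = f i := by
  induction l generalizing s with
  | nil => simp
  | cons a t ih =>
    simp only [List.foldl_cons, ih, PySem.Set.mem_add]
    constructor
    · rintro (⟨h | h⟩ | ⟨i, hi, hx⟩)
      · exact Or.inl h
      · exact Or.inr ⟨a, List.mem_cons_self, h⟩
      · exact Or.inr ⟨i, List.mem_cons_of_mem _ hi, hx⟩
    · rintro (h | ⟨i, hi, hx⟩)
      · exact Or.inl (Or.inl h)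
      · rcases List.mem_cons.mp hi with rfl | hi
        · exact Or.inl (Or.inr hx)
        · exact Or.inr ⟨i, hi, hx⟩

theorem mem_parent_dirs (paths : List String) (x : List Char) :
    x ∈ paths.foldl (fun s path =>
        let parts := PySem.Chars.splitOn path.toList ['/']
        (PySem.List.pyRange 1 (parts.length : Int)).foldl
          (fun s i => PySem.Set.add s (PySem.Chars.join ['/'] (parts.take i.toNat))) s)
        PySem.Set.empty
      ↔ ∃ q ∈ paths, ∃ i : Int, 1 ≤ i ∧ i < ((spC '/' q.toList).length : Int) ∧
          x = PySem.Chars.join ['/'] ((spC '/' q.toList).take i.toNat) := by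
  simp only [splitOn_eq_spC]
  have step : ∀ (l : List String) (s : PySem.Set (List Char)),
      x ∈ l.foldl (fun s path =>
        let parts := spC '/' path.toList
        (PySem.List.pyRange 1 (parts.length : Int)).foldl
          (fun s i => PySem.Set.add s (PySem.Chars.join ['/'] (parts.take i.toNat))) s) s
      ↔ x ∈ s ∨ ∃ q ∈ l, ∃ i : Int, 1 ≤ i ∧ i < ((spC '/' q.toList).length : Int) ∧
          x = PySem.Chars.join ['/'] ((spC '/' q.toList).take i.toNat) := by
    intro l
    induction l with
    | nil => simp
    | cons a t ih =>
      intro s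
      simp only [List.foldl_cons, ih, mem_foldl_add, PySem.List.mem_pyRange_one]
      constructor
      · rintro (⟨h | ⟨i, ⟨hi1, hi2⟩, hx⟩⟩ | ⟨q, hq, hrest⟩)
        · exact Or.inl h
        · exact Or.inr ⟨a, List.mem_cons_self, i, hi1, hi2, hx⟩
        · exact Or.inr ⟨q, List.mem_cons_of_mem _ hq, hrest⟩
      · rintro (h | ⟨q, hq, i, hi1, hi2, hx⟩)
        · exact Or.inl (Or.inl h)
        · rcases List.mem_cons.mp hq with rfl | hq
          · exact Or.inl (Or.inr ⟨i, ⟨hi1, hi2⟩, hx⟩)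
          · exact Or.inr ⟨q, hq, i, hi1, hi2, hx⟩
  rw [step]
  simp [PySem.Set.empty]

theorem map_fst_filter_zip {γ : Type} (f : String → γ) (pred : String → γ → Bool)
    (paths : List String) :
    (((paths.zip (paths.map f)).filter (fun pq => pred pq.1 pq.2)).map (·.1))
      = paths.filter (fun p => pred p (f p)) := by
  induction paths with
  | nil => simp
  | cons a t ih =>
    simp only [List.map_cons, List.zip_cons_cons, List.filter_cons]
    by_cases h : pred a (f a) = true
    · simp only [h, if_true, List.map_cons, ih]
    · simp only [h, Bool.false_eq_true, if_false]
      exact ih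

-- ===== VERDICT (by name: the statement is the Claim_ definition above) =====
theorem reduce_paths_spec : Claim_equal_reduce_paths := by
  intro paths _
  show reduce_paths paths = reduce_paths_alt paths
  rw [reduce_paths, reduce_paths_alt]
  rw [map_fst_filter_zip (f := fun p => PySem.Chars.splitOn p.toList ['/'])
      (pred := fun _ g => !((paths.map (fun p => PySem.Chars.splitOn p.toList ['/'])).any
        (fun qs => decide (g.length < qs.length) && qs.take g.length == g)))]
  apply List.filter_congr
  intro p hp
  congr 1
  rw [Bool.eq_iff_iff, PySem.Set.contains_iff, mem_parent_dirs, List.any_eq_true]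
  simp only [List.mem_map, splitOn_eq_spC, Bool.and_eq_true, decide_eq_true_eq, beq_iff_eq]
  constructor
  · rintro ⟨q, hq, hi⟩
    exact ⟨spC '/' q.toList, ⟨q, hq, rfl⟩, (prefix_char p.toList q.toList).mp hi⟩
  · rintro ⟨qs, ⟨q, hq, rfl⟩, hcond⟩
    exact ⟨q, hq, (prefix_char p.toList q.toList).mpr hcond⟩
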